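-- pv_equiv track=rewrite | github.com/Martin-Lange-Assis/trabalho-final-seguranca-da-informacao | seg/abrir_salvar_Arquivo.py | PKCS7_Padding
-- ===== SOURCE A (Python) =====
-- def PKCS7_Padding(matriz):
--     # Junta todos os elementos da matriz em uma lista única (ordem por linhas)
--     flat = []
--     for linha in matriz:
--         flat.extend(linha)
--     total = len(flat)
--     # Calcula o padding necessário para completar múltiplos de 16
--     resto = total % 16
--     if resto == 0:
--         padding = 16
--     else:
--         padding = 16 - resto
--     # Adiciona o padding (valor em hexadecimal, ex: 0x10)
--     flat.extend([f"0x{padding:02X}"] * padding)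
--     # Quebra em blocos de 16
--     blocos = []
--     for i in range(0, len(flat), 16):
--         blocos.append(flat[i:i+16])
--     return blocos
-- ===== SOURCE B (Python) =====
-- def PKCS7_Padding(matriz):
--     # Single streaming pass: fill a current block, flush at 16; then push padding
--     # through the same block-filling logic.
--     blocos = []
--     cur = []
--     for linha in matriz:
--         for x in linha:
--             cur.append(x)
--             if len(cur) == 16:
--                 blocos.append(cur)
--                 cur = []
--     padding = 16 - len(cur)          # len(cur) == total % 16, so this matches 16 - total % 16 (16 when 0)
--     pad = f"0x{padding:02X}"
--     for _ in range(padding):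
--         cur.append(pad)
--         if len(cur) == 16:
--             blocos.append(cur)
--             cur = []
--     return blocos
-- ===== Notes on version B (the rewrite author's own statement) =====
-- stated objective: alternative
-- what changed: Replaced A's three phases (flatten whole matrix, append padding, then re-scan with range/slicing into 16-blocks) by one streaming pass that keeps a current-block accumulator flushed at 16, with the padding pushed through the same block-filling step; the flat intermediate list and all slicing disappear.
import Mathlib
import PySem

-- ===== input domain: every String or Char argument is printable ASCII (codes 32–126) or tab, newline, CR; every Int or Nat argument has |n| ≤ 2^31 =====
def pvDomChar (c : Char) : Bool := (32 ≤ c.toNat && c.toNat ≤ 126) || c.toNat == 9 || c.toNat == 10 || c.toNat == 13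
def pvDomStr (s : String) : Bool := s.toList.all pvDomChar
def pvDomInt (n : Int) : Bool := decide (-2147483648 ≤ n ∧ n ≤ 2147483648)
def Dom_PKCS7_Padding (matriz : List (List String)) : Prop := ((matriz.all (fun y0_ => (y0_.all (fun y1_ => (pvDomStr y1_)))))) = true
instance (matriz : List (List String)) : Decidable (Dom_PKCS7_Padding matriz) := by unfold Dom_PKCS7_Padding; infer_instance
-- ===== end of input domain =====

-- B replaces A's flatten/pad/slice phases by one streaming pass with a current-block
-- accumulator flushed at 16 (alternative decomposition, same asymptotic cost).

-- shared helper: Python's f"0x{p:02X}" (exact for 0 ≤ n < 256; both Pythons format the same way)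
def hexDig (d : Nat) : Char := (['0','1','2','3','4','5','6','7','8','9','A','B','C','D','E','F'].getD d '0')
def hex02X (n : Nat) : String := "0x" ++ String.ofList [hexDig (n / 16 % 16), hexDig (n % 16)]

-- ===== PORT A =====
def PKCS7_Padding (matriz : List (List String)) : List (List String) :=
  -- flat = []; for linha in matriz: flat.extend(linha)
  let flat : List String := matriz.foldl (fun acc linha => acc ++ linha) []
  let total := flat.length
  let resto := total % 16
  let padding := if resto = 0 then 16 else 16 - resto
  -- flat.extend([f"0x{padding:02X}"] * padding)
  let flat2 := flat ++ List.replicate padding (hex02X padding)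
  -- blocos = []; for i in range(0, len(flat), 16): blocos.append(flat[i:i+16])
  (PySem.List.pyRange 0 (flat2.length : Int) 16).foldl
    (fun blocos i => blocos ++ [PySem.List.slice flat2 (some i) (some (i + 16))]) []

-- ===== PORT B =====
-- cur.append(x); if len(cur) == 16: blocos.append(cur); cur = []
def pkcs7Step (st : List (List String) × List String) (x : String) :
    List (List String) × List String :=
  let cur := st.2 ++ [x]
  if cur.length = 16 then (st.1 ++ [cur], []) else (st.1, cur)

def PKCS7_Padding_alt (matriz : List (List String)) : List (List String) :=
  let st := matriz.foldl (fun s linha => linha.foldl pkcs7Step s) ([], [])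
  let padding := 16 - st.2.length
  let pad := hex02X padding
  -- for _ in range(padding): push pad through the same step
  let st2 := (List.replicate padding pad).foldl pkcs7Step st
  st2.1

-- ===== PRECONDITION & SPEC =====
def Spec_PKCS7_Padding (matriz : List (List String)) (out : List (List String)) : Prop := out = PKCS7_Padding_alt matriz
instance (matriz : List (List String)) (out : List (List String)) : Decidable (Spec_PKCS7_Padding matriz out) := by unfold Spec_PKCS7_Padding; infer_instance

-- ===== CLAIM (what is proved, stated in full; the proofs are below) =====
def Claim_equal_PKCS7_Padding : Prop := ∀ (matriz : List (List String)), Dom_PKCS7_Padding matriz → Spec_PKCS7_Padding matriz (PKCS7_Padding matriz)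

-- ===== LEMMAS AND PROOFS =====

-- common normal form: the list of 16-blocks of L, as a map over block indices
def pvBlocks (n : Nat) (L : List String) : List (List String) :=
  (List.range n).map (fun k => (L.drop (16 * k)).take 16)

theorem pv_foldl_push {α β : Type} (f : α → β) :
    ∀ (l : List α) (B : List β), l.foldl (fun b x => b ++ [f x]) B = B ++ l.map f := by
  intro l
  induction l with
  | nil => simp
  | cons x xs ih => intro B; simp [List.foldl_cons, ih]

theorem pv_foldl_appendl :
    ∀ (m : List (List String)) (acc : List String),
      m.foldl (fun a l => a ++ l) acc = acc ++ m.flatten := by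
  intro m
  induction m with
  | nil => simp
  | cons l ls ih => intro acc; simp [List.foldl_cons, ih]

-- filling at most one block: folding ys into (B, cur) with cur.length < 16 and room ≤ 16
theorem pv_fill :
    ∀ (ys : List String) (B : List (List String)) (cur : List String),
      cur.length < 16 → cur.length + ys.length ≤ 16 →
      ys.foldl pkcs7Step (B, cur) =
        if cur.length + ys.length = 16 then (B ++ [cur ++ ys], []) else (B, cur ++ ys) := by
  intro ys
  induction ys with
  | nil => intro B cur h1 _; simp [Nat.ne_of_lt h1]
  | cons y ys ih =>
    intro B cur h1 h2
    simp only [List.foldl_cons, pkcs7Step]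
    by_cases h : (cur ++ [y]).length = 16
    · have hys : ys = [] := by
        simp only [List.length_append, List.length_cons, List.length_nil] at h
        cases ys with
        | nil => rfl
        | cons a l => simp only [List.length_cons] at h2; omega
      subst hys
      simp only [List.foldl_nil]
      simp only [List.length_append, List.length_cons, List.length_nil] at h
      simp [h]
    · rw [if_neg h]
      have hlen : (cur ++ [y]).length < 16 := by
        simp only [List.length_append, List.length_cons, List.length_nil] at h ⊢
        simp only [List.length_cons] at h2
        omega
      have hroom : (cur ++ [y]).length + ys.length ≤ 16 := by
        simp only [List.length_append, List.length_cons, List.length_nil]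
        simp only [List.length_cons] at h2
        omega
      rw [ih B (cur ++ [y]) hlen hroom]
      have hc : (cur ++ [y]).length + ys.length = cur.length + (y :: ys).length := by
        simp only [List.length_append, List.length_cons, List.length_nil]
        omega
      rw [hc, List.append_assoc]
      simp

theorem pvBlocks_succ (n : Nat) (L : List String) :
    pvBlocks (n + 1) L = L.take 16 :: pvBlocks n (L.drop 16) := by
  unfold pvBlocks
  rw [List.range_succ_eq_map, List.map_cons, List.map_map]
  simp only [List.drop_drop, Nat.mul_zero, List.drop_zero]
  congr 1
  apply List.map_congr_left
  intro a _
  simp only [Function.comp_apply, Nat.succ_eq_add_one]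
  have h16 : 16 * (a + 1) = 16 + 16 * a := by omega
  rw [h16]

-- streaming a list whose length is a multiple of 16 emits exactly its 16-blocks
theorem pv_stream_full :
    ∀ (n : Nat) (L : List String) (B : List (List String)),
      L.length = 16 * n →
      L.foldl pkcs7Step (B, []) = (B ++ pvBlocks n L, []) := by
  intro n
  induction n with
  | zero =>
    intro L B h
    have : L = [] := List.eq_nil_of_length_eq_zero (by omega)
    subst this; simp [pvBlocks]
  | succ n ih =>
    intro L B h
    have hsplit : L = L.take 16 ++ L.drop 16 := (List.take_append_drop 16 L).symm
    have hlen16 : (L.take 16).length = 16 := by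
      rw [List.length_take]; omega
    calc L.foldl pkcs7Step (B, [])
        = (L.drop 16).foldl pkcs7Step ((L.take 16).foldl pkcs7Step (B, [])) := by
          conv_lhs => rw [hsplit]
          rw [List.foldl_append]
      _ = (L.drop 16).foldl pkcs7Step (B ++ [L.take 16], []) := by
          rw [pv_fill (L.take 16) B [] (by simp) (by simp [hlen16])]
          simp [hlen16]
      _ = (B ++ [L.take 16] ++ pvBlocks n (L.drop 16), []) := by
          exact ih (L.drop 16) (B ++ [L.take 16]) (by rw [List.length_drop]; omega)
      _ = (B ++ pvBlocks (n + 1) L, []) := by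
          rw [pvBlocks_succ, List.append_assoc]
          rfl

-- A's slice loop over range(0, 16*m, 16) produces the 16-blocks
theorem pv_slices (m : Nat) (L : List String) (h : L.length = 16 * m) :
    (PySem.List.pyRange 0 (L.length : Int) 16).foldl
      (fun blocos i => blocos ++ [PySem.List.slice L (some i) (some (i + 16))]) []
    = pvBlocks m L := by
  rw [h]
  push_cast
  rw [PySem.List.pyRange_of_pos 0 (16 * (m : Int)) (by norm_num)]
  have hcnt : (if (0 : Int) < 16 * (m : Int) then (((16 * (m : Int)) - 0 + 16 - 1) / 16).toNat else 0) = m := by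
    by_cases hm : 0 < m
    · rw [if_pos (by positivity)]
      have : ((16 * (m : Int)) - 0 + 16 - 1) / 16 = (m : Int) := by omega
      rw [this]; simp
    · have : m = 0 := by omega
      subst this; simp
  rw [hcnt]
  rw [List.foldl_map]
  rw [pv_foldl_push (fun (k : Nat) => PySem.List.slice L (some (0 + 16 * (k : Int))) (some (0 + 16 * (k : Int) + 16)))
        (List.range m) []]
  simp only [List.nil_append]
  unfold pvBlocks
  apply List.map_congr_left
  intro k _
  have h1 : (0 : Int) + 16 * (k : Int) = ((16 * k : Nat) : Int) := by push_cast; ring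
  rw [h1]
  have h3 := PySem.List.slice_natCast_add L (16 * k) 16
  simpa using h3

theorem PKCS7_Padding_eq (matriz : List (List String)) :
    PKCS7_Padding matriz = PKCS7_Padding_alt matriz := by
  unfold PKCS7_Padding PKCS7_Padding_alt
  dsimp only []
  set F := matriz.flatten with hF
  have hflat : matriz.foldl (fun acc linha => acc ++ linha) [] = F := by
    rw [pv_foldl_appendl, List.nil_append]
  have hstream : matriz.foldl (fun s linha => linha.foldl pkcs7Step s) ([], []) =
      F.foldl pkcs7Step ([], []) := by
    rw [← List.foldl_flatten]
  set q := F.length / 16 with hq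
  set r := F.length % 16 with hr
  have hrlt : r < 16 := Nat.mod_lt _ (by norm_num)
  have hFlen : F.length = 16 * q + r := by rw [hq, hr]; omega
  have hsplitF : F = F.take (16 * q) ++ F.drop (16 * q) := (List.take_append_drop _ F).symm
  have htklen : (F.take (16 * q)).length = 16 * q := by rw [List.length_take]; omega
  have hdrlen : (F.drop (16 * q)).length = r := by rw [List.length_drop]; omega
  have hst : F.foldl pkcs7Step ([], []) = (pvBlocks q (F.take (16 * q)), F.drop (16 * q)) := by
    conv_lhs => rw [hsplitF]
    rw [List.foldl_append]
    rw [pv_stream_full q (F.take (16 * q)) [] htklen]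
    rw [pv_fill (F.drop (16 * q)) _ [] (by simp) (by simp [hdrlen]; omega)]
    rw [List.length_nil, List.nil_append, hdrlen]
    rw [if_neg (by omega)]
    simp
  have hpad : (if r = 0 then 16 else 16 - r) = 16 - r := by
    by_cases h0 : r = 0 <;> simp [h0]
  rw [hflat, hstream, hst, hdrlen, hpad]
  set p := 16 - r with hp
  set pad := hex02X p with hpd
  have hfill2 : (List.replicate p pad).foldl pkcs7Step (pvBlocks q (F.take (16 * q)), F.drop (16 * q)) =
      (pvBlocks q (F.take (16 * q)) ++ [F.drop (16 * q) ++ List.replicate p pad], []) := by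
    rw [pv_fill _ _ _ (by rw [hdrlen]; omega) (by rw [hdrlen, List.length_replicate]; omega)]
    rw [hdrlen, List.length_replicate]
    rw [if_pos (by omega)]
  rw [hfill2]
  set L2 := F ++ List.replicate p pad with hL2
  have hL2len : L2.length = 16 * (q + 1) := by
    rw [hL2, List.length_append, List.length_replicate, hFlen]; omega
  rw [pv_slices (q + 1) L2 hL2len]
  show pvBlocks (q + 1) L2 = pvBlocks q (F.take (16 * q)) ++ [F.drop (16 * q) ++ List.replicate p pad]
  unfold pvBlocks
  rw [List.range_succ, List.map_append]
  congr 1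
  · apply List.map_congr_left
    intro k hk
    rw [List.mem_range] at hk
    have hkb : 16 * k + 16 ≤ 16 * q := by omega
    have h1 : L2.drop (16 * k) = F.drop (16 * k) ++ List.replicate p pad :=
      List.drop_append_of_le_length (by omega)
    rw [h1, List.take_append_of_le_length (by rw [List.length_drop]; omega)]
    rw [List.drop_take, List.take_take]
    congr 1
    omega
  · simp only [List.map_cons, List.map_nil]
    congr 1
    have h1 : L2.drop (16 * q) = F.drop (16 * q) ++ List.replicate p pad :=
      List.drop_append_of_le_length (by omega)
    rw [h1]
    apply List.take_of_length_le
    rw [List.length_append, hdrlen, List.length_replicate]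
    omega

-- ===== VERDICT (by name: the statement is the Claim_ definition above) =====
theorem PKCS7_Padding_spec : Claim_equal_PKCS7_Padding := by
  intro matriz _
  unfold Spec_PKCS7_Padding
  exact PKCS7_Padding_eq matriz
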